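-- pv_equiv track=rewrite | github.com/Georgi-Zahariev/CS112_GMU_Fall22 | CS112_GMU/Programming Assignments/gzaharie_213_PA6.py | shift_elems
-- ===== SOURCE A (Python) =====
-- def shift_elems(elems, rt_shift = 1, filler = "X"):
-- 	#j is how many times will the numbers be shifter
-- 	for j in range(rt_shift):
-- 		for i in range(len(elems) - 1,-1, -1):
-- 			#shifting every number staring from the last
-- 			if i == 0:
-- 				#putting filler where as a value for the first element
-- 				elems[i]=filler
-- 			else:
-- 				elems[i]=elems[i-1]
-- 	return elems
-- ===== SOURCE B (Python) =====
-- def shift_elems(elems, rt_shift = 1, filler = "X"):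
--     # Closed form: shifting right rt_shift times discards the last k = min(rt_shift, n)
--     # elements and prepends k fillers. One slice assignment keeps the in-place mutation.
--     n = len(elems)
--     k = min(max(rt_shift, 0), n)
--     elems[:] = [filler] * k + elems[:n - k]
--     return elems
-- ===== Notes on version B (the rewrite author's own statement) =====
-- stated objective: faster
-- what changed: Replaces the rt_shift repeated element-by-element bubbling passes with a closed-form slice assignment: prepend min(rt_shift, n) fillers to the surviving prefix in one step.
import Mathlib
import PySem

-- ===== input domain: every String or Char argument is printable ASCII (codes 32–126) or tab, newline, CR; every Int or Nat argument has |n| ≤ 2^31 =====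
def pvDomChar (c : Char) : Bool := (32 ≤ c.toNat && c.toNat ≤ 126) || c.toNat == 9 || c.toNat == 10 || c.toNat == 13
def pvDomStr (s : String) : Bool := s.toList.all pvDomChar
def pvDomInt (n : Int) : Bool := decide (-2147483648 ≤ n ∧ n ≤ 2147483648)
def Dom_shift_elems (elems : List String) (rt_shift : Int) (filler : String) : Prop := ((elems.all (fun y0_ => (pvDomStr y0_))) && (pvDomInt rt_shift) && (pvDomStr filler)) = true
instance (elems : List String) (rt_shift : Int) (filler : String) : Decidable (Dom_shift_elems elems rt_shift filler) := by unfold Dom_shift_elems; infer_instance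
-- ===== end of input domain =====

-- B replaces A's rt_shift bubbling passes with one closed-form slice assignment:
-- min(rt_shift, n) fillers prepended to the surviving prefix (measured faster, O(n)).
-- Both Pythons mutate `elems` in place identically and return it; the theorems are
-- about the returned value.

-- ===== PORT A =====
-- inner loop 'for i in range(len(elems)-1, -1, -1)': counts the index down from
-- len(elems)-1 to 0 (the Nat argument is the number of indices still to process).
def shiftInnerA (filler : String) (l : List String) : Nat → List String
  | 0 => l
  | i + 1 =>
    shiftInnerA filler
      (if i = 0 then PySem.List.pySetD l (i : Int) filler
       else PySem.List.pySetD l (i : Int) (PySem.List.pyGetD l ((i : Int) - 1) "")) i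

-- outer loop 'for j in range(rt_shift)': the loop variable j is unused, so the
-- counter only counts the remaining iterations (range(rt_shift) has rt_shift.toNat of them).
def shiftOuterA (filler : String) (l : List String) : Nat → List String
  | 0 => l
  | j + 1 => shiftOuterA filler (shiftInnerA filler l l.length) j

def shift_elems (elems : List String) (rt_shift : Int) (filler : String) : List String :=
  shiftOuterA filler elems rt_shift.toNat

-- ===== PORT B =====
def shift_elems_alt (elems : List String) (rt_shift : Int) (filler : String) : List String :=
  let n : Int := (elems.length : Int)
  let k : Int := min (max rt_shift 0) n
  List.replicate k.toNat filler ++ elems.take (n - k).toNat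

-- ===== PRECONDITION & SPEC =====
def Spec_shift_elems (elems : List String) (rt_shift : Int) (filler : String) (out : List String) : Prop := out = shift_elems_alt elems rt_shift filler
instance (elems : List String) (rt_shift : Int) (filler : String) (out : List String) : Decidable (Spec_shift_elems elems rt_shift filler out) := by unfold Spec_shift_elems; infer_instance

-- ===== CLAIM (what is proved, stated in full; the proofs are below) =====
def Claim_equal_shift_elems : Prop := ∀ (elems : List String) (rt_shift : Int) (filler : String), Dom_shift_elems elems rt_shift filler → Spec_shift_elems elems rt_shift filler (shift_elems elems rt_shift filler)

-- ===== LEMMAS AND PROOFS =====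

-- Closed form of the r-shifted list: entry i is l[i-r] when r ≤ i, else filler.
def M (r : Int) (filler : String) (l : List String) : List String :=
  (List.range l.length).map (fun (i : Nat) =>
    if r ≤ (i : Int) then PySem.List.pyGetD l ((i : Int) - r) "" else filler)

theorem length_M (r : Int) (filler : String) (l : List String) :
    (M r filler l).length = l.length := by
  simp [M]

theorem innerA_prefix (filler : String) :
    ∀ (t : Nat) (l : List String), t ≤ l.length →
      shiftInnerA filler l t
        = ((List.range t).map (fun (i : Nat) =>
            if i = 0 then filler else PySem.List.pyGetD l ((i : Int) - 1) ""))
          ++ l.drop t := by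
  intro t
  induction t with
  | zero => intro l _; simp [shiftInnerA]
  | succ t ih =>
    intro l hl
    set v : String :=
      if t = 0 then filler else PySem.List.pyGetD l ((t : Int) - 1) "" with hv
    have hstep : shiftInnerA filler l (t + 1) = shiftInnerA filler (l.set t v) t := by
      by_cases h : t = 0
      · subst h
        simp only [shiftInnerA, hv]
        rw [PySem.List.pySetD_of_nonneg _ _ (by omega : (0 : Int) ≤ ((0 : Nat) : Int))]
        norm_num
      · simp only [shiftInnerA, hv, if_neg h]
        rw [PySem.List.pySetD_of_nonneg _ _ (by omega : (0 : Int) ≤ ((t : Nat) : Int))]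
        simp
    rw [hstep, ih (l.set t v) (by simp; omega)]
    have hmap : ((List.range t).map (fun (i : Nat) =>
        if i = 0 then filler else PySem.List.pyGetD (l.set t v) ((i : Int) - 1) ""))
        = ((List.range t).map (fun (i : Nat) =>
        if i = 0 then filler else PySem.List.pyGetD l ((i : Int) - 1) "")) := by
      apply List.map_congr_left
      intro i hi
      have hi' : i < t := List.mem_range.mp hi
      by_cases h : i = 0
      · rw [if_pos h, if_pos h]
      · rw [if_neg h, if_neg h,
            PySem.List.pyGetD_eq_getElem _ _ (by omega)
              (by rw [List.length_set]; exact_mod_cast (by omega : ((i : Int) - 1) < (l.length : Int))),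
            PySem.List.pyGetD_eq_getElem _ _ (by omega)
              (by exact_mod_cast (by omega : ((i : Int) - 1) < (l.length : Int)))]
        rw [List.getElem_set_ne (by omega)]
    rw [hmap]
    have hdrop : (l.set t v).drop t = v :: l.drop (t + 1) := by
      rw [List.drop_set, if_neg (by omega), Nat.sub_self]
      have hne : l.drop t ≠ [] := by
        rw [ne_eq, List.drop_eq_nil_iff]
        omega
      obtain ⟨a, rest, he⟩ := List.exists_cons_of_ne_nil hne
      have h3 : l.drop (t + 1) = rest := by
        have h4 : (l.drop t).drop 1 = l.drop (t + 1) := by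
          rw [List.drop_drop, Nat.add_comm]
        rw [← h4, he, List.drop_one, List.tail_cons]
      rw [he, h3, List.set_cons_zero]
    rw [hdrop, List.range_succ, List.map_append, List.append_assoc]
    simp only [List.map_cons, List.map_nil, List.singleton_append]
    congr 2

-- One full inner pass is the closed one-step shift M 1.
theorem innerA_eq_M (filler : String) (l : List String) :
    shiftInnerA filler l l.length = M 1 filler l := by
  rw [innerA_prefix filler l.length l le_rfl, List.drop_length, List.append_nil]
  unfold M
  apply List.map_congr_left
  intro i _
  by_cases h : i = 0
  · subst h; norm_num
  · rw [if_neg h, if_pos (by omega : (1 : Int) ≤ (i : Int))]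

theorem M_one_M (filler : String) (k : Int) (hk : 0 ≤ k) (l : List String) :
    M 1 filler (M k filler l) = M (k + 1) filler l := by
  apply List.ext_getElem
  · simp [length_M]
  · intro i h1 h2
    have hi : i < l.length := by simpa [length_M] using h2
    simp only [M, List.getElem_map, List.getElem_range]
    by_cases h : (1 : Int) ≤ (i : Int)
    · rw [if_pos h]
      have hnn : (0 : Int) ≤ (i : Int) - 1 := by omega
      rw [PySem.List.pyGetD_eq_getElem _ _ hnn (by simp; omega)]
      have hlt' : ((i : Int) - 1).toNat < l.length := by omega
      simp only [List.getElem_map, List.getElem_range]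
      have hcast : ((((i : Int) - 1).toNat : Nat) : Int) = (i : Int) - 1 :=
        Int.toNat_of_nonneg hnn
      rw [hcast]
      by_cases hk2 : k ≤ (i : Int) - 1
      · rw [if_pos hk2, if_pos (by omega : k + 1 ≤ (i : Int))]
        congr 1
        ring
      · rw [if_neg hk2, if_neg (by omega : ¬ k + 1 ≤ (i : Int))]
    · rw [if_neg h, if_neg (by omega : ¬ k + 1 ≤ (i : Int))]

-- The outer loop iterates the full inner pass.
theorem outerA_eq_iterate (filler : String) :
    ∀ (k : Nat) (l : List String),
      shiftOuterA filler l k = (fun l' => shiftInnerA filler l' l'.length)^[k] l := by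
  intro k
  induction k with
  | zero => intro l; rfl
  | succ k ih =>
    intro l
    rw [Function.iterate_succ_apply]
    exact ih (shiftInnerA filler l l.length)

theorem iterate_innerA (filler : String) (l : List String) :
    ∀ (k : Nat), 1 ≤ k →
      (fun l' => shiftInnerA filler l' l'.length)^[k] l = M (k : Int) filler l := by
  intro k
  induction k with
  | zero => omega
  | succ k ih =>
    intro _
    by_cases hk : 1 ≤ k
    · rw [Function.iterate_succ_apply', ih hk]
      show shiftInnerA filler (M (k : Int) filler l) (M (k : Int) filler l).length
          = M ((k + 1 : Nat) : Int) filler l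
      rw [innerA_eq_M, M_one_M filler (k : Int) (by omega)]
      congr 1
    · have hk0 : k = 0 := by omega
      subst hk0
      show shiftInnerA filler l l.length = M ((1 : Nat) : Int) filler l
      rw [innerA_eq_M]
      congr 1
  
-- M's closed form IS B's result: min(r,n) fillers followed by the surviving prefix.
theorem M_eq_closed (r : Int) (filler : String) (hr : 1 ≤ r) (l : List String) :
    M r filler l = shift_elems_alt l r filler := by
  unfold shift_elems_alt
  set n : Int := (l.length : Int) with hn
  have hmax : max r 0 = r := by omega
  rw [hmax]
  set k : Int := min r n with hk
  have hk0 : 0 ≤ k := by omega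
  have hkn : k ≤ n := by omega
  apply List.ext_getElem
  · simp [length_M]
    omega
  · intro i h1 h2
    have hi : i < l.length := by simpa [length_M] using h1
    simp only [M, List.getElem_map, List.getElem_range]
    by_cases h : r ≤ (i : Int)
    · rw [if_pos h]
      have hik : k.toNat ≤ i := by omega
      rw [List.getElem_append_right (by rw [List.length_replicate]; exact hik)]
      simp only [List.getElem_take, List.length_replicate]
      rw [PySem.List.pyGetD_eq_getElem _ _ (by omega) (by exact_mod_cast (by omega : (i : Int) - r < n))]
      congr 1
      have hkr : k = r := by omega
      omega
    · rw [if_neg h]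
      have hik : i < k.toNat := by omega
      rw [List.getElem_append_left (by rw [List.length_replicate]; exact hik), List.getElem_replicate]

-- ===== VERDICT (by name: the statement is the Claim_ definition above) =====
theorem shift_elems_spec : Claim_equal_shift_elems := by
  intro elems rt_shift filler _
  unfold Spec_shift_elems shift_elems
  by_cases hrt : rt_shift ≤ 0
  · rw [show rt_shift.toNat = 0 from by omega]
    unfold shift_elems_alt
    have hmax : max rt_shift 0 = 0 := by omega
    rw [hmax]
    simp [shiftOuterA]
  · have h1 : (1 : Nat) ≤ rt_shift.toNat := by omega
    rw [outerA_eq_iterate, iterate_innerA filler elems rt_shift.toNat h1,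
        show ((rt_shift.toNat : Nat) : Int) = rt_shift from by omega]
    exact M_eq_closed rt_shift filler (by omega) elems
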